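-- pv_equiv track=rewrite | github.com/rkthomps/lean-client | src/lean_client/lsp_utils.py | parse_lean_docstring
-- ===== SOURCE A (Python) =====
-- from dataclasses import dataclass
-- from typing import Optional
--
-- @dataclass
-- class ParseResult:
--     parsed: str
--     rest: str
--
-- def consume_whitespace(s: str) -> ParseResult:
--     stripped_string = s.lstrip()
--     stripped_space = s[: len(s) - len(stripped_string)]
--     return ParseResult(parsed=stripped_space, rest=stripped_string)
--
-- def parse_lean_docstring(s: str) -> Optional[str]:
--     """
--     Parses lean docstring (i.e. /-- docstring -/)
--     Consumes leading and trailing whitespace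
--     """
--     whitespace = consume_whitespace(s)
--     if not whitespace.rest.startswith("/--"):
--         return None
--     rest = whitespace.rest[3:]
--     num_closing_dashes = 0
--     for i in range(len(rest)):
--         if rest[i: i + 2] == "/-":
--             num_closing_dashes += 1
--         elif rest[i: i + 2] == "-/":
--             if num_closing_dashes == 0:
--                 doc_str = whitespace.parsed + \
--                     whitespace.rest[:3] + rest[: i + 2]
--                 trailing_whitespace = consume_whitespace(rest[i + 2:])
--                 doc_str += trailing_whitespace.parsed
--                 assert s.startswith(doc_str)
--                 return doc_str
--             else:
--                 num_closing_dashes -= 1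
--     return None
-- ===== SOURCE B (Python) =====
-- from typing import Optional
--
--
-- def parse_lean_docstring(s: str) -> Optional[str]:
--     """
--     Parses lean docstring (i.e. /-- docstring -/)
--     Consumes leading and trailing whitespace
--     """
--     rest_all = s.lstrip()
--     if not rest_all.startswith("/--"):
--         return None
--     lead = len(s) - len(rest_all)
--     rest = rest_all[3:]
--     idx = 0
--     depth = 0
--     while True:
--         a = rest.find("/-", idx)
--         b = rest.find("-/", idx)
--         if a == -1 and b == -1:
--             return None
--         if b == -1 or (a != -1 and a < b):
--             depth += 1
--             idx = a + 1
--         elif depth == 0: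
--             tail = rest[b + 2:]
--             end = lead + 3 + b + 2 + (len(tail) - len(tail.lstrip()))
--             return s[:end]
--         else:
--             depth -= 1
--             idx = b + 1
-- ===== Notes on version B (the rewrite author's own statement) =====
-- stated objective: alternative
-- what changed: B replaces A's per-index character scan (slicing a two-character window at every position) with a while loop that jumps straight to the next comment-open or comment-close delimiter via str.find, and returns a prefix slice of s of computed length instead of re-concatenating the consumed pieces.
import Mathlib
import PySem

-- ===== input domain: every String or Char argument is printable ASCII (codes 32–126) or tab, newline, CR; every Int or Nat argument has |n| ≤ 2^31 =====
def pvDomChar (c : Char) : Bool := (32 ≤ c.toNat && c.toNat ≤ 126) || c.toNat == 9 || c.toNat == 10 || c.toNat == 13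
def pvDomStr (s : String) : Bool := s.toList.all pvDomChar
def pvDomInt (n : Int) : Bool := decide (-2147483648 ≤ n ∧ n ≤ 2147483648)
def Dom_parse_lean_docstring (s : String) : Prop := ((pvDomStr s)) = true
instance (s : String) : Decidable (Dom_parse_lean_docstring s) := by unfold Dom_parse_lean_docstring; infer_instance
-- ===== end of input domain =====

-- B replaces A's per-index scan of `rest` by a while loop that jumps between the
-- next occurrences of the comment delimiters located with str.find, and returns
-- a prefix slice of s instead of re-concatenating the consumed pieces.

-- ===== PORT A =====

-- consume_whitespace: (parsed, rest)
def consumeWhitespaceA (s : List Char) : List Char × List Char :=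
  let stripped := PySem.Chars.lstrip s
  (PySem.List.slice s none (some ((s.length : Int) - (stripped.length : Int))), stripped)

-- A's `for i in range(len(rest))` loop; it returns the index i at which the
-- docstring closes (A builds doc_str at that point; the caller below assembles
-- the very same value from the returned index)
def loopA (rest : List Char) (i : Nat) (depth : Int) : Option Nat :=
  if i < rest.length then
    if PySem.List.slice rest (some (i : Int)) (some ((i : Int) + 2)) = ['/', '-'] then
      loopA rest (i + 1) (depth + 1)
    else if PySem.List.slice rest (some (i : Int)) (some ((i : Int) + 2)) = ['-', '/'] then
      if depth = 0 then some i
      else loopA rest (i + 1) (depth - 1)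
    else loopA rest (i + 1) depth
  else none
termination_by rest.length - i

-- A's `assert s.startswith(doc_str)` never fires (doc_str is by construction a
-- prefix of s), so it is ported without the check.
def parse_lean_docstring (s : String) : Option String :=
  let ws := consumeWhitespaceA s.toList
  if PySem.Chars.startswith ws.2 ['/', '-', '-'] then
    let rest := PySem.List.slice ws.2 (some 3) none
    match loopA rest 0 0 with
    | some i =>
      let docStr := ws.1 ++ PySem.List.slice ws.2 none (some 3)
        ++ PySem.List.slice rest none (some ((i : Int) + 2))
      let tw := consumeWhitespaceA (PySem.List.slice rest (some ((i : Int) + 2)) none)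
      some (String.ofList (docStr ++ tw.1))
    | none => none
  else none

-- ===== PORT B =====

theorem pvFindFrom_gt_len (s sub : List Char) (k : Nat) (h : s.length < k) :
    PySem.Chars.findFrom s sub (k : Int) = -1 := by
  simp only [PySem.Chars.findFrom]
  have h1 : ¬ ((k : Int) < 0) := by omega
  simp [h1]; omega

-- k ≤ pos and pos + 2 ≤ len for a successful 2-char findFrom (termination of loopB)
theorem pvFindFrom_two_bounds (s : List Char) (c d : Char) (k : Nat)
    (h : PySem.Chars.findFrom s [c, d] (k : Int) ≠ -1) :
    k ≤ (PySem.Chars.findFrom s [c, d] (k : Int)).toNat ∧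
      (PySem.Chars.findFrom s [c, d] (k : Int)).toNat + 2 ≤ s.length := by
  have hk : k ≤ s.length := by
    by_contra hk
    exact h (pvFindFrom_gt_len s [c, d] k (by omega))
  obtain ⟨h1, h2, _⟩ := PySem.Chars.findFrom_natCast_spec s [c, d] k hk h
  have hge : k ≤ (PySem.Chars.findFrom s [c, d] (k : Int)).toNat := by omega
  have hlen := h2.length_le
  simp [List.length_drop] at hlen
  exact ⟨hge, by omega⟩

-- B's while loop: jump to the next comment delimiter; returns the closing index
def loopB (rest : List Char) (idx : Nat) (depth : Int) : Option Nat :=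
  if h1 : PySem.Chars.findFrom rest ['/', '-'] (idx : Int) = -1 ∧
          PySem.Chars.findFrom rest ['-', '/'] (idx : Int) = -1 then none
  else if h2 : PySem.Chars.findFrom rest ['-', '/'] (idx : Int) = -1 ∨
      (PySem.Chars.findFrom rest ['/', '-'] (idx : Int) ≠ -1 ∧
       PySem.Chars.findFrom rest ['/', '-'] (idx : Int) < PySem.Chars.findFrom rest ['-', '/'] (idx : Int)) then
    loopB rest ((PySem.Chars.findFrom rest ['/', '-'] (idx : Int)).toNat + 1) (depth + 1)
  else if depth = 0 then some (PySem.Chars.findFrom rest ['-', '/'] (idx : Int)).toNat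
  else loopB rest ((PySem.Chars.findFrom rest ['-', '/'] (idx : Int)).toNat + 1) (depth - 1)
termination_by rest.length + 1 - idx
decreasing_by
  · have ha : PySem.Chars.findFrom rest ['/', '-'] (idx : Int) ≠ -1 := by
      rcases h2 with hb | ⟨ha, _⟩
      · intro ha; exact h1 ⟨ha, hb⟩
      · exact ha
    have := pvFindFrom_two_bounds rest '/' '-' idx ha
    omega
  · have hb : PySem.Chars.findFrom rest ['-', '/'] (idx : Int) ≠ -1 := by
      intro hb; exact h2 (Or.inl hb)
    have := pvFindFrom_two_bounds rest '-' '/' idx hb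
    omega

def parse_lean_docstring_alt (s : String) : Option String :=
  let restAll := PySem.Chars.lstrip s.toList
  if PySem.Chars.startswith restAll ['/', '-', '-'] then
    let lead := s.toList.length - restAll.length
    let rest := PySem.List.slice restAll (some 3) none
    match loopB rest 0 0 with
    | some p =>
      let tail := PySem.List.slice rest (some ((p : Int) + 2)) none
      let endPos := lead + 3 + p + 2 + (tail.length - (PySem.Chars.lstrip tail).length)
      some (String.ofList (List.take endPos s.toList))
    | none => none
  else none

-- ===== PRECONDITION & SPEC =====
def Spec_parse_lean_docstring (s : String) (out : Option String) : Prop := out = parse_lean_docstring_alt s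
instance (s : String) (out : Option String) : Decidable (Spec_parse_lean_docstring s out) := by unfold Spec_parse_lean_docstring; infer_instance

-- ===== CLAIM (what is proved, stated in full; the proofs are below) =====
def Claim_equal_parse_lean_docstring : Prop := ∀ (s : String), Dom_parse_lean_docstring s → Spec_parse_lean_docstring s (parse_lean_docstring s)

-- ===== LEMMAS AND PROOFS =====

theorem pvInfix_of_drop_prefix (s sub : List Char) (m : Nat) (hp : sub <+: s.drop m) :
    sub <:+: s := by
  obtain ⟨t, ht⟩ := hp
  exact ⟨s.take m, t, by rw [List.append_assoc, ht, List.take_append_drop]⟩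

theorem pvFind_eq_of (s sub : List Char) (m : Nat) (hp : sub <+: s.drop m)
    (hmin : ∀ i < m, ¬ sub <+: s.drop i) : PySem.Chars.find s sub = (m : Int) := by
  have hinf := pvInfix_of_drop_prefix s sub m hp
  have hnn : 0 ≤ PySem.Chars.find s sub := (PySem.Chars.find_nonneg_iff s sub).2 hinf
  obtain ⟨h1, h2⟩ := PySem.Chars.find_spec hnn
  have : (PySem.Chars.find s sub).toNat = m := by
    rcases Nat.lt_trichotomy (PySem.Chars.find s sub).toNat m with h | h | h
    · exact absurd h1 (hmin _ h)
    · exact h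
    · exact absurd hp (h2 m h)
  omega

theorem pvFindFrom_eq_self (s sub : List Char) (k : Nat) (hk : k ≤ s.length)
    (h : sub <+: s.drop k) : PySem.Chars.findFrom s sub (k : Int) = (k : Int) := by
  have h0 : PySem.Chars.find (s.drop k) sub = ((0 : Nat) : Int) := by
    apply pvFind_eq_of
    · simpa using h
    · omega
  rw [PySem.Chars.findFrom_natCast s sub k hk]
  simp [h0]

theorem pvFindFrom_succ (s sub : List Char) (k : Nat) (hk : k < s.length)
    (h : ¬ sub <+: s.drop k) :
    PySem.Chars.findFrom s sub (k : Int) = PySem.Chars.findFrom s sub ((k + 1 : Nat) : Int) := by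
  have hdrop : ∀ i : Nat, (s.drop (k+1)).drop i = (s.drop k).drop (i+1) := by
    intro i; simp [List.drop_drop]; ring_nf
  rw [PySem.Chars.findFrom_natCast s sub k (by omega),
      PySem.Chars.findFrom_natCast s sub (k+1) (by omega)]
  rcases eq_or_ne (PySem.Chars.find (s.drop (k+1)) sub) (-1) with hneg | hne
  · have hni : ¬ sub <:+: s.drop (k+1) := (PySem.Chars.find_eq_neg_one_iff _ _).1 hneg
    have : PySem.Chars.find (s.drop k) sub = -1 := by
      rw [PySem.Chars.find_eq_neg_one_iff]
      intro hinf
      obtain ⟨j, hj⟩ := (PySem.Chars.exists_prefix_drop_iff_isIn sub (s.drop k)).2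
        ((PySem.Chars.isIn_iff_infix sub (s.drop k)).2 hinf)
      match j with
      | 0 => exact h (by simpa using hj)
      | j+1 =>
        exact hni (pvInfix_of_drop_prefix _ _ j (by rw [hdrop]; exact hj))
    simp [this, hneg]
  · have hnn : 0 ≤ PySem.Chars.find (s.drop (k+1)) sub := by
      have := PySem.Chars.neg_one_le_find (s.drop (k+1)) sub
      omega
    obtain ⟨h1, h2⟩ := PySem.Chars.find_spec hnn
    set m := (PySem.Chars.find (s.drop (k+1)) sub).toNat with hm
    have hfind : PySem.Chars.find (s.drop k) sub = ((m + 1 : Nat) : Int) := by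
      apply pvFind_eq_of
      · rw [← hdrop]; exact h1
      · intro i hi
        match i with
        | 0 => simpa using h
        | i+1 =>
          rw [← hdrop]
          exact h2 i (by omega)
    rw [hfind]
    have hm' : PySem.Chars.find (s.drop (k+1)) sub = (m : Int) := by omega
    rw [hm']
    have hne1 : ((m + 1 : Nat) : Int) ≠ -1 := by omega
    simp only [hne1, if_false]
    have hne2 : (m : Int) ≠ -1 := by omega
    simp only [hne2, if_false]
    push_cast
    ring

theorem pvSlice2 (rest : List Char) (i : Nat) :
    PySem.List.slice rest (some (i : Int)) (some ((i : Int) + 2)) = (rest.drop i).take 2 := by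
  have h : ((i : Int) + 2) = ((i + 2 : Nat) : Int) := by push_cast; ring
  rw [h, PySem.List.slice_natCast]
  congr 1
  omega

theorem pvTake2_prefix (t : List Char) (c d : Char) :
    t.take 2 = [c, d] ↔ [c, d] <+: t := by
  rw [List.prefix_iff_eq_take]
  constructor <;> (intro h; simp_all)

theorem pvLoopB_none (rest : List Char) (i : Nat) (depth : Int) (h : rest.length ≤ i) :
    loopB rest i depth = none := by
  have ha : PySem.Chars.findFrom rest ['/', '-'] (i : Int) = -1 := by
    rcases Nat.lt_or_ge rest.length i with h' | h'
    · exact pvFindFrom_gt_len _ _ _ h'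
    · have hi : i = rest.length := by omega
      subst hi
      rw [PySem.Chars.findFrom_natCast_eq_neg_one_iff rest _ rest.length le_rfl]
      simp
  have hb : PySem.Chars.findFrom rest ['-', '/'] (i : Int) = -1 := by
    rcases Nat.lt_or_ge rest.length i with h' | h'
    · exact pvFindFrom_gt_len _ _ _ h'
    · have hi : i = rest.length := by omega
      subst hi
      rw [PySem.Chars.findFrom_natCast_eq_neg_one_iff rest _ rest.length le_rfl]
      simp
  rw [loopB]
  simp [ha, hb]

-- the two loops agree at every start index and depth
theorem loop_eq (rest : List Char) (n : Nat) : ∀ (i : Nat) (depth : Int),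
    rest.length + 1 - i ≤ n →
    loopA rest i depth = loopB rest i depth := by
  induction n with
  | zero =>
    intro i depth hn
    have hi : rest.length < i := by omega
    rw [loopA, pvLoopB_none rest i depth (by omega)]
    simp [Nat.not_lt.2 (le_of_lt hi)]
  | succ n ih =>
    intro i depth hn
    rcases Nat.lt_or_ge i rest.length with hi | hi
    · by_cases hopen : (rest.drop i).take 2 = ['/', '-']
      · -- open delimiter at i
        have hpre : ['/', '-'] <+: rest.drop i := (pvTake2_prefix _ _ _).1 hopen
        have ha : PySem.Chars.findFrom rest ['/', '-'] (i : Int) = (i : Int) :=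
          pvFindFrom_eq_self rest _ i (by omega) hpre
        have hnb : ¬ ['-', '/'] <+: rest.drop i := by
          intro hc
          have := (pvTake2_prefix (rest.drop i) '-' '/').2 hc
          rw [hopen] at this
          simp at this
        have hbgt : PySem.Chars.findFrom rest ['-', '/'] (i : Int) = -1 ∨
            (i : Int) < PySem.Chars.findFrom rest ['-', '/'] (i : Int) := by
          rcases eq_or_ne (PySem.Chars.findFrom rest ['-', '/'] (i : Int)) (-1) with hb | hb
          · exact Or.inl hb
          · right
            obtain ⟨hge, hsp, _⟩ := PySem.Chars.findFrom_natCast_spec rest ['-', '/'] i (by omega) hb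
            have hne : (PySem.Chars.findFrom rest ['-', '/'] (i : Int)).toNat ≠ i := by
              intro he
              rw [he] at hsp
              exact hnb hsp
            omega
        have hA : loopA rest i depth = loopA rest (i + 1) (depth + 1) := by
          rw [loopA]
          simp [hi, pvSlice2, hopen]
        have hB : loopB rest i depth = loopB rest (i + 1) (depth + 1) := by
          rw [loopB]
          have hne : (i : Int) ≠ -1 := by omega
          have hcond : PySem.Chars.findFrom rest ['-', '/'] (i : Int) = -1 ∨
              (PySem.Chars.findFrom rest ['/', '-'] (i : Int) ≠ -1 ∧
               PySem.Chars.findFrom rest ['/', '-'] (i : Int) < PySem.Chars.findFrom rest ['-', '/'] (i : Int)) := by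
            rcases hbgt with h | h
            · exact Or.inl h
            · exact Or.inr ⟨by rw [ha]; exact hne, by rw [ha]; exact h⟩
          rw [dif_neg (by rw [ha]; intro hc; exact hne hc.1), dif_pos hcond, ha]
          simp
        rw [hA, hB]
        exact ih (i + 1) (depth + 1) (by omega)
      · by_cases hclose : (rest.drop i).take 2 = ['-', '/']
        · -- close delimiter at i
          have hpre : ['-', '/'] <+: rest.drop i := (pvTake2_prefix _ _ _).1 hclose
          have hb : PySem.Chars.findFrom rest ['-', '/'] (i : Int) = (i : Int) :=
            pvFindFrom_eq_self rest _ i (by omega) hpre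
          have hna : ¬ ['/', '-'] <+: rest.drop i := by
            intro hc
            have := (pvTake2_prefix (rest.drop i) '/' '-').2 hc
            rw [hclose] at this
            simp at this
          have hagt : ∀ _ : PySem.Chars.findFrom rest ['/', '-'] (i : Int) ≠ -1,
              (i : Int) < PySem.Chars.findFrom rest ['/', '-'] (i : Int) := by
            intro hne
            obtain ⟨hge, hsp, _⟩ := PySem.Chars.findFrom_natCast_spec rest ['/', '-'] i (by omega) hne
            have hne2 : (PySem.Chars.findFrom rest ['/', '-'] (i : Int)).toNat ≠ i := by
              intro he
              rw [he] at hsp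
              exact hna hsp
            omega
          have hbne : PySem.Chars.findFrom rest ['-', '/'] (i : Int) ≠ -1 := by
            rw [hb]; omega
          have hnot2 : ¬ (PySem.Chars.findFrom rest ['-', '/'] (i : Int) = -1 ∨
              (PySem.Chars.findFrom rest ['/', '-'] (i : Int) ≠ -1 ∧
               PySem.Chars.findFrom rest ['/', '-'] (i : Int) < PySem.Chars.findFrom rest ['-', '/'] (i : Int))) := by
            rintro (hc | ⟨hne, hlt⟩)
            · exact hbne hc
            · have := hagt hne
              rw [hb] at hlt
              omega
          have hB : loopB rest i depth =
              if depth = 0 then some i else loopB rest (i + 1) (depth - 1) := by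
            rw [loopB]
            rw [dif_neg (by intro hc; exact hbne hc.2), dif_neg hnot2, hb]
            simp
          have hA : loopA rest i depth =
              if depth = 0 then some i else loopA rest (i + 1) (depth - 1) := by
            rw [loopA]
            simp [hi, pvSlice2, hclose]
          rw [hA, hB]
          by_cases hd : depth = 0
          · simp [hd]
          · simp only [hd, if_false]
            exact ih (i + 1) (depth - 1) (by omega)
        · -- no token at i
          have hna : ¬ ['/', '-'] <+: rest.drop i := fun hc => hopen ((pvTake2_prefix _ _ _).2 hc)
          have hnb : ¬ ['-', '/'] <+: rest.drop i := fun hc => hclose ((pvTake2_prefix _ _ _).2 hc)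
          have hsa := pvFindFrom_succ rest ['/', '-'] i hi hna
          have hsb := pvFindFrom_succ rest ['-', '/'] i hi hnb
          have hA : loopA rest i depth = loopA rest (i + 1) depth := by
            rw [loopA]
            simp [hi, pvSlice2, hopen, hclose]
          have hB : loopB rest i depth = loopB rest (i + 1) depth := by
            conv_lhs => rw [loopB]
            conv_rhs => rw [loopB]
            rw [hsa, hsb]
          rw [hA, hB]
          exact ih (i + 1) depth (by omega)
    · rw [loopA, pvLoopB_none rest i depth hi]
      simp [Nat.not_lt.2 hi]

-- a successful loopA points at a close delimiter that fits inside rest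
theorem loopA_some_le (rest : List Char) (i : Nat) (depth : Int) (k : Nat)
    (h : loopA rest i depth = some k) : k + 2 ≤ rest.length := by
  induction i, depth using loopA.induct rest with
  | case1 i depth hi hop ih => rw [loopA] at h; simp [hi, hop] at h; exact ih h
  | case2 i hi hop hcl =>
    rw [loopA] at h
    simp [hi, hcl] at h
    subst h
    rw [pvSlice2] at hcl
    have := congrArg List.length hcl
    simp [List.length_take, List.length_drop] at this
    omega
  | case3 i depth hi hop hcl hd ih =>
    rw [loopA] at h; simp [hi, hcl, hd] at h; exact ih h
  | case4 i depth hi hop hcl ih =>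
    rw [loopA] at h; simp [hi, hop, hcl] at h; exact ih h
  | case5 i depth hi => rw [loopA] at h; simp [hi] at h

-- A's consume_whitespace.parsed slice is takeWhile isspace
theorem pvWsParsed (u : List Char) :
    PySem.List.slice u none (some ((u.length : Int) - ((PySem.Chars.lstrip u).length : Int))) =
      u.takeWhile PySem.Chars.isspace := by
  have hle : (PySem.Chars.lstrip u).length ≤ u.length := by
    simp [PySem.Chars.lstrip]
    exact List.length_dropWhile_le _ _
  have hcast : (u.length : Int) - ((PySem.Chars.lstrip u).length : Int) =
      ((u.length - (PySem.Chars.lstrip u).length : Nat) : Int) := by omega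
  rw [hcast, PySem.List.slice_to_natCast]
  have hsplit := List.takeWhile_append_dropWhile (p := PySem.Chars.isspace) (l := u)
  have hlen : (u.takeWhile PySem.Chars.isspace).length =
      u.length - (PySem.Chars.lstrip u).length := by
    have h2 : (u.takeWhile PySem.Chars.isspace).length +
        (u.dropWhile PySem.Chars.isspace).length = u.length := by
      rw [← List.length_append, hsplit]
    simp only [PySem.Chars.lstrip]
    omega
  rw [← hlen]
  have := List.prefix_iff_eq_take.1 (List.takeWhile_prefix (p := PySem.Chars.isspace) (l := u))
  exact this.symm

-- assembling the returned docstring: A's concatenation is B's prefix of s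

theorem pvAssemble (W R : List Char) (i : Nat)
    (h3 : 3 ≤ R.length) (hi2 : i + 2 ≤ (R.drop 3).length) :
    W ++ R.take 3 ++ (R.drop 3).take (i + 2) ++
        ((R.drop 3).drop (i + 2)).takeWhile PySem.Chars.isspace =
      (W ++ R).take ((W ++ R).length - R.length + 3 + i + 2 +
        (((R.drop 3).drop (i + 2)).length -
          (PySem.Chars.lstrip ((R.drop 3).drop (i + 2))).length)) := by
  set tail := (R.drop 3).drop (i + 2) with htail
  set tw := tail.takeWhile PySem.Chars.isspace with htw
  set dw := tail.dropWhile PySem.Chars.isspace with hdw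
  have htwdw : tw ++ dw = tail := List.takeWhile_append_dropWhile
  have hlens : tw.length + dw.length = tail.length := by
    rw [← List.length_append, htwdw]
  have e1 : R = R.take 3 ++ ((R.drop 3).take (i + 2) ++ (tw ++ dw)) := by
    rw [htwdw, htail, List.take_append_drop, List.take_append_drop]
  have hsplit : W ++ R = (W ++ R.take 3 ++ (R.drop 3).take (i + 2) ++ tw) ++ dw := by
    conv_lhs => rw [e1]
    simp [List.append_assoc]
  have hn : (W ++ R).length - R.length + 3 + i + 2 +
      (tail.length - (PySem.Chars.lstrip tail).length) =
      (W ++ R.take 3 ++ (R.drop 3).take (i + 2) ++ tw).length := by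
    have htl : tail.length = (R.drop 3).length - (i + 2) := by
      rw [htail]; simp; omega
    have hd3 : (List.drop 3 R).length = R.length - 3 := by simp
    simp only [PySem.Chars.lstrip, ← hdw, List.length_append, List.length_take,
      List.length_drop] at htl ⊢
    omega
  rw [hn, hsplit, List.take_left' rfl]

-- ===== VERDICT (by name: the statement is the Claim_ definition above) =====
set_option maxHeartbeats 1000000 in
theorem parse_lean_docstring_spec : Claim_equal_parse_lean_docstring := by
  intro s _
  unfold Spec_parse_lean_docstring parse_lean_docstring parse_lean_docstring_alt consumeWhitespaceA
  simp only
  by_cases hsw : PySem.Chars.startswith (PySem.Chars.lstrip s.toList) ['/', '-', '-'] = true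
  · simp only [hsw, if_true]
    rw [← loop_eq (PySem.List.slice (PySem.Chars.lstrip s.toList) (some 3) none)
        ((PySem.List.slice (PySem.Chars.lstrip s.toList) (some 3) none).length + 1) 0 0 (by omega)]
    generalize hL : loopA (PySem.List.slice (PySem.Chars.lstrip s.toList) (some 3) none) 0 0 = r
    cases r with
    | none => rfl
    | some i =>
      have hi2 : i + 2 ≤ (PySem.List.slice (PySem.Chars.lstrip s.toList) (some 3) none).length :=
        loopA_some_le _ _ _ _ hL
      show some _ = some _
      refine congrArg some ?_
      refine congrArg String.ofList ?_
      have hc : ((i : Int) + 2) = ((i + 2 : Nat) : Int) := by push_cast; ring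
      have h30 : (3 : Int) = ((3 : Nat) : Int) := rfl
      rw [pvWsParsed s.toList, hc, h30, PySem.List.slice_from_natCast,
        PySem.List.slice_to_natCast, PySem.List.slice_from_natCast,
        PySem.List.slice_to_natCast, pvWsParsed]
      rw [h30, PySem.List.slice_from_natCast] at hi2
      have h3 : 3 ≤ (PySem.Chars.lstrip s.toList).length := by
        have := (PySem.Chars.startswith_iff _ _).1 hsw
        simpa using this.length_le
      have key := pvAssemble (s.toList.takeWhile PySem.Chars.isspace)
        (PySem.Chars.lstrip s.toList) i h3 hi2
      have hWR : s.toList = s.toList.takeWhile PySem.Chars.isspace ++ PySem.Chars.lstrip s.toList := by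
        simp [PySem.Chars.lstrip]
      rw [← hWR] at key
      exact key
  · simp [hsw]
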